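-- pv_equiv track=rewrite | github.com/Adineamtu/BladeEye-Automated-Detection-Monitor | backend/patterns.py | learn_pattern
-- ===== SOURCE A (Python) =====
-- from typing import Dict, List
--
-- def learn_pattern(bitstrings: List[str]) -> Dict[str, str]:
--     """Return consensus pattern for *bitstrings*.
--
--     The returned dictionary contains ``mask`` and ``bits`` keys. The mask has a
--     ``1`` at positions where all input strings agree on the bit value and ``0``
--     otherwise.  The ``bits`` entry stores the expected bits for those positions
--     (with don't-care bits set to ``0``).
--     """
--
--     if not bitstrings:
--         return {"mask": "", "bits": ""}
--
--     max_len = max(len(b) for b in bitstrings)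
--     mask_chars: List[str] = []
--     bit_chars: List[str] = []
--     for i in range(max_len):
--         chars = [b[i] if i < len(b) else None for b in bitstrings]
--         if all(c in "01" for c in chars) and len(set(chars)) == 1:
--             mask_chars.append("1")
--             bit_chars.append(chars[0] or "0")
--         else:
--             mask_chars.append("0")
--             bit_chars.append("0")
--     return {"mask": "".join(mask_chars), "bits": "".join(bit_chars)}
-- ===== SOURCE B (Python) =====
-- def _step(cell, ch):
--     c, alive = cell
--     if not alive:
--         return cell
--     if ch is None or ch not in "01":
--         return (c, False)
--     if c is None:
--         return (ch, True)
--     if c != ch: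
--         return (c, False)
--     return cell
--
--
-- def learn_pattern(bitstrings):
--     """Consensus via a single per-position (consensus, alive) state folded
--     over the strings, instead of rebuilding a column list + set per position."""
--     if not bitstrings:
--         return {"mask": "", "bits": ""}
--     max_len = max(map(len, bitstrings))
--     state = [(None, True)] * max_len
--     for b in bitstrings:
--         state = [_step(cell, b[i] if i < len(b) else None)
--                  for i, cell in enumerate(state)]
--     mask = "".join("1" if alive and c is not None else "0" for c, alive in state)
--     bits = "".join(c if alive and c is not None else "0" for c, alive in state)
--     return {"mask": mask, "bits": bits}
-- ===== Notes on version B (the rewrite author's own statement) =====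
-- stated objective: alternative
-- what changed: B replaces A's per-position rebuild of a column list plus a set-cardinality test by a single per-position (consensus, alive) state folded once over the strings with early kill of dead positions.
import Mathlib
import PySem

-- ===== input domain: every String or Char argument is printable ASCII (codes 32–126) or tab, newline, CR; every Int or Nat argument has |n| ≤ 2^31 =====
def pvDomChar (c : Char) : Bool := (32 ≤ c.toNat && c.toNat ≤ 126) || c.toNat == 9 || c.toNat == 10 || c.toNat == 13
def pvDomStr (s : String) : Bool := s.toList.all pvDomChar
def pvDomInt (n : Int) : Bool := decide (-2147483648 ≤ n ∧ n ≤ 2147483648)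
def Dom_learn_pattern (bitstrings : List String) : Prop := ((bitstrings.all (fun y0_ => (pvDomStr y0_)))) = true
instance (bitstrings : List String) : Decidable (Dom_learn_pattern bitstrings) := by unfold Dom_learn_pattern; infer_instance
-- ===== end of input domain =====

-- B replaces A's per-position column list + set-cardinality test by a per-position
-- (consensus, alive) state folded once over the strings; same cost, different decomposition.

-- ===== PORT A =====
-- `c in "01"` on the Python side RAISES TypeError when c is None; Pre_ excludes exactly
-- the inputs on which that None is reached, so returning `false` for `none` here is
-- faithful on every admitted input (there the test is short-circuited to False earlier).
def pvGoodOpt (c? : Option Char) : Bool :=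
  match c? with
  | some c => c == '0' || c == '1'
  | none => false

def learn_pattern (bitstrings : List String) : List (String × String) :=
  if bitstrings = [] then [("mask", ""), ("bits", "")]
  else
    -- max(len(b) for b in bitstrings); the `.getD 0` is unreachable (list nonempty)
    let max_len : Int := (PySem.List.max? (bitstrings.map (fun b => PySem.Str.len b)) (fun x => x)).getD 0
    let p := (PySem.List.pyRange 0 max_len 1).foldl
      (fun (acc : List Char × List Char) i =>
        let chars : List (Option Char) :=
          bitstrings.map (fun b => if i < PySem.Str.len b then PySem.Str.pyGet? b i else none)
        if chars.all pvGoodOpt && ((PySem.Set.ofList chars).length == 1) then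
          -- `chars[0] or "0"`: chars[0] here is a truthy one-char string, so it is chars[0]
          (acc.1 ++ ['1'], acc.2 ++ [(chars.head?.join).getD '0'])
        else
          (acc.1 ++ ['0'], acc.2 ++ ['0']))
      ([], [])
    [("mask", String.ofList p.1), ("bits", String.ofList p.2)]

-- ===== PORT B =====
def pvStep (cell : Option Char × Bool) (ch : Option Char) : Option Char × Bool :=
  if cell.2 = false then cell
  else
    match ch with
    | none => (cell.1, false)
    | some c =>
      if !(c == '0' || c == '1') then (cell.1, false)
      else
        match cell.1 with
        | none => (some c, true)
        | some c0 => if c0 != c then (cell.1, false) else cell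

def learn_pattern_alt (bitstrings : List String) : List (String × String) :=
  if bitstrings = [] then [("mask", ""), ("bits", "")]
  else
    let maxLen : Nat := (bitstrings.map (fun b => b.toList.length)).foldl max 0
    let final := bitstrings.foldl
      (fun st b => st.mapIdx (fun i cell => pvStep cell b.toList[i]?))
      (List.replicate maxLen ((none : Option Char), true))
    [("mask", String.ofList (final.map (fun cell => if cell.2 && cell.1.isSome then '1' else '0'))),
     ("bits", String.ofList (final.map (fun cell => if cell.2 && cell.1.isSome then cell.1.getD '0' else '0')))]

-- ===== PRECONDITION & SPEC =====
def pvGoodAt (b : String) (i : Nat) : Bool :=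
  match b.toList[i]? with
  | some c => c == '0' || c == '1'
  | none => false

-- Pre_ excludes exactly the inputs on which A raises TypeError: at some position i a
-- string has already ended (its column entry is None) while every earlier string still
-- has a '0'/'1' character there, so `all(c in "01" ...)` reaches the None and raises.
def Pre_learn_pattern (bitstrings : List String) : Prop :=
  ∀ i < (bitstrings.map (fun b => b.toList.length)).foldl max 0,
    ∀ j < bitstrings.length,
      (bitstrings.getD j "").toList.length ≤ i →
      (∀ k < j, i < (bitstrings.getD k "").toList.length) →
      ∃ k < j, pvGoodAt (bitstrings.getD k "") i = false
instance (bitstrings : List String) : Decidable (Pre_learn_pattern bitstrings) := by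
  unfold Pre_learn_pattern; infer_instance

def pvWitness_learn_pattern : List String := ["01", "0a", "11"]

def Spec_learn_pattern (bitstrings : List String) (out : List (String × String)) : Prop := out = learn_pattern_alt bitstrings
instance (bitstrings : List String) (out : List (String × String)) : Decidable (Spec_learn_pattern bitstrings out) := by unfold Spec_learn_pattern; infer_instance

-- ===== CLAIM (what is proved, stated in full; the proofs are below) =====
def Claim_equal_learn_pattern : Prop := ∀ (bitstrings : List String), Dom_learn_pattern bitstrings → Pre_learn_pattern bitstrings → Spec_learn_pattern bitstrings (learn_pattern bitstrings)

-- ===== LEMMAS AND PROOFS =====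

-- A's column at index i, and its mask condition (proof-side names for A's loop body)
def pvColA (bs : List String) (i : Int) : List (Option Char) :=
  bs.map (fun b => if i < PySem.Str.len b then PySem.Str.pyGet? b i else none)
def pvCondA (bs : List String) (i : Int) : Bool :=
  (pvColA bs i).all pvGoodOpt && ((PySem.Set.ofList (pvColA bs i)).length == 1)
def pvF (bs : List String) (i : Int) : Char := if pvCondA bs i then '1' else '0'
def pvG (bs : List String) (i : Int) : Char :=
  if pvCondA bs i then (((pvColA bs i).head?).join).getD '0' else '0'

-- a dead cell stays dead and keeps its consensus
theorem pv_fold_dead (os : List (Option Char)) (x : Option Char) :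
    os.foldl pvStep (x, false) = (x, false) := by
  induction os with
  | nil => rfl
  | cons o t ih => simpa [pvStep] using ih

-- once the consensus is a bit c, the position survives iff every later entry is `some c`
theorem pv_fold_some (os : List (Option Char)) (c : Char) (hc : (c == '0' || c == '1') = true) :
    os.foldl pvStep (some c, true) = (some c, os.all (· == some c)) := by
  induction os with
  | nil => rfl
  | cons o t ih =>
    by_cases ho : o = some c
    · subst ho
      simpa [pvStep, hc] using ih
    · have hstep : pvStep (some c, true) o = (some c, false) := by
        cases o with
        | none => rfl
        | some d =>
          have hdc : (c != d) = true := by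
            simp only [bne_iff_ne, ne_eq]
            rintro rfl; exact ho rfl
          by_cases hd : (d == '0' || d == '1') = true
          · simp [pvStep, hd, hdc]
          · have hd' : (d == '0' || d == '1') = false := Bool.eq_false_iff.mpr hd
            simp [pvStep, hd']
      have ho' : ((o == some c) : Bool) = false := beq_eq_false_iff_ne.mpr ho
      simp [List.foldl_cons, hstep, pv_fold_dead, List.all_cons, ho']

theorem pv_set_singleton (o : Option Char) (rest : List (Option Char))
    (h : rest.all (· == o) = true) : PySem.Set.ofList (o :: rest) = [o] := by
  have key : ∀ (l : List (Option Char)), l.all (· == o) = true →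
      l.foldl PySem.Set.add [o] = [o] := by
    intro l
    induction l with
    | nil => intro _; rfl
    | cons x t ih =>
      intro hx
      simp only [List.all_cons, Bool.and_eq_true, beq_iff_eq] at hx
      obtain ⟨rfl, ht⟩ := hx
      simpa [PySem.Set.add, PySem.Set.contains] using ih (by simpa using ht)
  simpa [PySem.Set.ofList_eq_foldl, PySem.Set.add, PySem.Set.empty, PySem.Set.contains]
    using key rest h

-- A's column condition, specialised at a column headed by a bit c, is B's survival test
theorem pv_cond_iff (c : Char) (rest : List (Option Char)) (hc : (c == '0' || c == '1') = true) :
    (((some c :: rest).all pvGoodOpt) && ((PySem.Set.ofList (some c :: rest)).length == 1))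
      = rest.all (· == some c) := by
  by_cases h : rest.all (· == some c) = true
  · have hall : (some c :: rest).all pvGoodOpt = true := by
      simp only [List.all_cons, Bool.and_eq_true]
      refine ⟨by simpa [pvGoodOpt] using hc, ?_⟩
      rw [List.all_eq_true] at h ⊢
      intro x hx
      have hx' := h x hx
      simp only [beq_iff_eq] at hx'
      subst hx'
      simpa [pvGoodOpt] using hc
    rw [h, hall, pv_set_singleton _ _ h]
    rfl
  · have h' : rest.all (· == some c) = false := Bool.eq_false_iff.mpr h
    rw [h', Bool.eq_false_iff]
    intro hcontra
    apply h
    simp only [Bool.and_eq_true, beq_iff_eq] at hcontra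
    obtain ⟨-, hlen⟩ := hcontra
    obtain ⟨z, hz⟩ := List.length_eq_one_iff.mp hlen
    have hcz : some c = z := by
      have hm : some c ∈ PySem.Set.ofList (some c :: rest) :=
        (PySem.Set.mem_ofList _ _).mpr (by simp)
      rw [hz] at hm; simpa using hm
    rw [List.all_eq_true]
    intro x hx
    have hm : x ∈ PySem.Set.ofList (some c :: rest) :=
      (PySem.Set.mem_ofList _ _).mpr (by simp [hx])
    rw [hz] at hm
    simp only [List.mem_singleton] at hm
    simp [hm, ← hcz]

-- per-position agreement between A's column test and B's folded cell
theorem pv_pointwise (os : List (Option Char)) (hne : os ≠ []) :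
    ((if (os.all pvGoodOpt) && ((PySem.Set.ofList os).length == 1) then '1' else '0'),
     (if (os.all pvGoodOpt) && ((PySem.Set.ofList os).length == 1)
        then ((os.head?).join).getD '0' else '0'))
      = ((if (os.foldl pvStep (none, true)).2 && (os.foldl pvStep (none, true)).1.isSome
            then '1' else '0'),
         (if (os.foldl pvStep (none, true)).2 && (os.foldl pvStep (none, true)).1.isSome
            then (os.foldl pvStep (none, true)).1.getD '0' else '0')) := by
  cases os with
  | nil => exact absurd rfl hne
  | cons o rest =>
    cases o with
    | none =>
      have hfold : (none :: rest).foldl pvStep ((none : Option Char), true) = (none, false) := by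
        simpa [pvStep] using pv_fold_dead rest none
      simp [hfold, pvGoodOpt]
    | some c =>
      by_cases hc : (c == '0' || c == '1') = true
      · have hfold : (some c :: rest).foldl pvStep ((none : Option Char), true)
            = (some c, rest.all (· == some c)) := by
          have h1 : pvStep ((none : Option Char), true) (some c) = (some c, true) := by
            simp [pvStep, hc]
          simpa [h1] using pv_fold_some rest c hc
        rw [hfold, show ((some c :: rest).all pvGoodOpt
              && ((PySem.Set.ofList (some c :: rest)).length == 1))
            = rest.all (· == some c) from pv_cond_iff c rest hc]
        by_cases h : rest.all (· == some c) = true <;> simp [h]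
      · have hc' : (c == '0' || c == '1') = false := Bool.eq_false_iff.mpr hc
        have hfold : (some c :: rest).foldl pvStep ((none : Option Char), true)
            = (none, false) := by
          have h1 : pvStep ((none : Option Char), true) (some c) = (none, false) := by
            simp [pvStep, hc']
          simpa [h1] using pv_fold_dead rest none
        have hbad : pvGoodOpt (some c) = false := by simpa [pvGoodOpt] using hc'
        simp [hfold, hbad]

-- A's loop: appending a pair of chars per index is a pair of maps
theorem pv_foldl_pair (l : List Int) (f g : Int → Char) (a b : List Char) :
    l.foldl (fun acc i => (acc.1 ++ [f i], acc.2 ++ [g i])) (a, b)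
      = (a ++ l.map f, b ++ l.map g) := by
  induction l generalizing a b with
  | nil => simp
  | cons x t ih => simp [ih]

-- B's loop: folding per-string mapIdx updates over a range-shaped state is a
-- per-index fold over the strings
theorem pv_fold_mapIdx (bs : List String) (M : Nat) (g : Nat → Option Char × Bool) :
    bs.foldl (fun st b => st.mapIdx (fun i cell => pvStep cell b.toList[i]?))
        ((List.range M).map g)
      = (List.range M).map (fun i => bs.foldl (fun cell b => pvStep cell b.toList[i]?) (g i)) := by
  induction bs generalizing g with
  | nil => simp
  | cons b t ih =>
    have hstep : ((List.range M).map g).mapIdx (fun i cell => pvStep cell b.toList[i]?)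
        = (List.range M).map (fun i => pvStep (g i) b.toList[i]?) := by
      apply List.ext_getElem
      · simp
      · intro i h1 h2
        simp [List.getElem_mapIdx]
    simp only [List.foldl_cons, hstep, ih (fun i => pvStep (g i) b.toList[i]?)]

-- A's column entry for string b at a Nat index i is b.toList[i]?
theorem pv_entry (b : String) (i : Nat) :
    (if (i : Int) < PySem.Str.len b then PySem.Str.pyGet? b (i : Int) else none)
      = b.toList[i]? := by
  by_cases h : (i : Int) < PySem.Str.len b
  · rw [if_pos h, PySem.Str.pyGet?_natCast]
  · rw [if_neg h]
    rw [PySem.Str.len_eq] at h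
    have h' : b.toList.length ≤ i := by exact_mod_cast not_lt.mp h
    simp [List.getElem?_eq_none h']

theorem pv_max_cast (l : List String) (a : Nat) :
    (l.map (fun b => ((b.toList.length : Nat) : Int))).foldl max (a : Int)
      = (((l.map (fun b => b.toList.length)).foldl max a : Nat) : Int) := by
  induction l generalizing a with
  | nil => rfl
  | cons x t ih =>
    simp only [List.map_cons, List.foldl_cons, ← Nat.cast_max]
    exact ih (max a x.toList.length)

-- the two ports agree on every input (Pre_ is only needed for A's PYTHON not to raise;
-- the Lean port of A totalises the raising `c in "01"` test to `false` at `none`, and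
-- every column containing a `none` is masked '0' by both ports)
theorem pv_eq (bs : List String) : learn_pattern bs = learn_pattern_alt bs := by
  cases bs with
  | nil => rfl
  | cons s t =>
    have hne : ¬(s :: t = ([] : List String)) := by simp
    simp only [learn_pattern, learn_pattern_alt, if_neg hne]
    set M : Nat := ((s :: t).map (fun b => b.toList.length)).foldl max 0 with hMdef
    have hM : (PySem.List.max? ((s :: t).map (fun b => PySem.Str.len b)) (fun x => x)).getD 0
        = (M : Int) := by
      rw [List.map_cons, PySem.List.max?_id_cons, Option.getD_some, PySem.Str.len_eq,
        show (t.map fun b => PySem.Str.len b)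
            = t.map (fun b => ((b.toList.length : Nat) : Int)) from
          List.map_congr_left fun b _ => PySem.Str.len_eq b,
        pv_max_cast t s.toList.length, hMdef]
      norm_cast
    rw [hM, PySem.List.pyRange_zero_nat]
    have hfun : (fun (acc : List Char × List Char) (i : Int) =>
        let chars : List (Option Char) :=
          (s :: t).map (fun b => if i < PySem.Str.len b then PySem.Str.pyGet? b i else none)
        if chars.all pvGoodOpt && ((PySem.Set.ofList chars).length == 1) then
          (acc.1 ++ ['1'], acc.2 ++ [(chars.head?.join).getD '0'])
        else
          (acc.1 ++ ['0'], acc.2 ++ ['0']))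
        = fun acc i => (acc.1 ++ [pvF (s :: t) i], acc.2 ++ [pvG (s :: t) i]) := by
      funext acc i
      simp only [pvF, pvG, pvCondA, pvColA]
      by_cases h : ((s :: t).map
          (fun b => if i < PySem.Str.len b then PySem.Str.pyGet? b i else none)).all pvGoodOpt
          && ((PySem.Set.ofList ((s :: t).map
             (fun b => if i < PySem.Str.len b then PySem.Str.pyGet? b i else none))).length == 1)
      · simp only [h, if_pos]
      · simp only [h, if_neg, Bool.false_eq_true, not_false_eq_true]
    rw [hfun, pv_foldl_pair]
    rw [show (List.replicate M ((none : Option Char), true))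
          = (List.range M).map (fun _ => ((none : Option Char), true)) by
        simp [List.map_const'],
      pv_fold_mapIdx]
    simp only [List.nil_append, List.map_map, Function.comp_def]
    have hpre : ∀ i : Nat,
        ((if pvCondA (s :: t) (i : Int) then '1' else '0'),
         (if pvCondA (s :: t) (i : Int)
            then (((pvColA (s :: t) (i : Int)).head?).join).getD '0' else '0'))
          = (((if ((s :: t).foldl (fun cell b => pvStep cell b.toList[i]?)
                  ((none : Option Char), true)).2
                && ((s :: t).foldl (fun cell b => pvStep cell b.toList[i]?)
                  ((none : Option Char), true)).1.isSome then '1' else '0'),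
             (if ((s :: t).foldl (fun cell b => pvStep cell b.toList[i]?)
                  ((none : Option Char), true)).2
                && ((s :: t).foldl (fun cell b => pvStep cell b.toList[i]?)
                  ((none : Option Char), true)).1.isSome
               then ((s :: t).foldl (fun cell b => pvStep cell b.toList[i]?)
                  ((none : Option Char), true)).1.getD '0' else '0'))) := by
      intro i
      have hcol : pvColA (s :: t) (i : Int) = (s :: t).map (fun b => b.toList[i]?) :=
        List.map_congr_left (fun b _ => pv_entry b i)
      have hbase := pv_pointwise ((s :: t).map (fun b => b.toList[i]?)) (by simp)
      rw [List.foldl_map] at hbase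
      simpa only [pvCondA, hcol] using hbase
    rw [List.map_congr_left (l := List.range M) (f := fun (i : Nat) => pvF (s :: t) (i : Int))
          (fun (i : Nat) _ => by simpa only [pvF] using congrArg Prod.fst (hpre i))]
    rw [List.map_congr_left (l := List.range M) (f := fun (i : Nat) => pvG (s :: t) (i : Int))
          (fun (i : Nat) _ => by simpa only [pvG] using congrArg Prod.snd (hpre i))]

-- ===== VERDICT (by name: the statement is the Claim_ definition above) =====
theorem learn_pattern_spec : Claim_equal_learn_pattern := by
  intro bs _ _
  exact pv_eq bs
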